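-- pv_equiv track=rewrite | github.com/leyanpan/MathLLM | lean_composer.py | parse_comment_block
-- ===== SOURCE A (Python) =====
-- from typing import List, Self, Optional, Tuple
--
-- def parse_comment_block(lines: List[str], index: int) -> Tuple[str, int]:
--     """
--     Parse a comment block that starts with '/-' and ends with '-/'.
--     Returns the comment content (without markers) and the new line index.
--     """
--     comment_lines = []
--     line = lines[index].strip()
--     if line.startswith("/-") and line.endswith("-/") and len(line) > 3:
--         comment_lines.append(line[2:-2].strip())
--         return "\n".join(comment_lines), index + 1
--     else:
--         comment_lines.append(line[2:].strip())
--         index += 1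
--         while index < len(lines):
--             line = lines[index].strip()
--             if line.endswith("-/"):
--                 comment_lines.append(line[:-2].strip())
--                 index += 1
--                 break
--             else:
--                 comment_lines.append(line)
--                 index += 1
--         return "\n".join(comment_lines).strip(), index
-- ===== SOURCE B (Python) =====
-- def parse_comment_block(lines, index):
--     first = lines[index].strip()
--     if first.startswith("/-") and first.endswith("-/") and len(first) > 3:
--         return first[2:-2].strip(), index + 1
--     # pass 1: find the terminator line j (first line after index whose stripped form ends with '-/')
--     j = next((k for k in range(index + 1, len(lines))
--               if lines[k].strip().endswith("-/")), None)
--     end = len(lines) if j is None else j + 1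
--     # pass 2: build the content entries from the located region
--     parts = [first[2:].strip()]
--     parts += [lines[k].strip()[:-2].strip() if k == j else lines[k].strip()
--               for k in range(index + 1, end)]
--     return "\n".join(parts).strip(), end
-- ===== Notes on version B (the rewrite author's own statement) =====
-- stated objective: alternative
-- what changed: A interleaves scanning and collecting in one while-loop with a break; B splits the work into two passes: first locate the terminator line, then build the content entries from the located region with a comprehension.
import Mathlib
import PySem

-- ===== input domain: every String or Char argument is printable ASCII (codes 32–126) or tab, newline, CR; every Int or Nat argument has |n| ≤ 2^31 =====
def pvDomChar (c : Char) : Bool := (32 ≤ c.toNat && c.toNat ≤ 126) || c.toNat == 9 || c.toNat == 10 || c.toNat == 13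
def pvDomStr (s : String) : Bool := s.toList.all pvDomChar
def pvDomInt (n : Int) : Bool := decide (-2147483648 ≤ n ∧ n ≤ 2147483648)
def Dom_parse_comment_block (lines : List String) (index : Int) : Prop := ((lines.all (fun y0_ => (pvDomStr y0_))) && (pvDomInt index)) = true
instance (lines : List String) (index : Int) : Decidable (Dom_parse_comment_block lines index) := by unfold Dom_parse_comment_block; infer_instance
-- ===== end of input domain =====

-- B re-decomposes A's interleaved scan-and-collect while-loop into two passes (find the
-- terminator line first, then build the content entries from the located region); objective:
-- alternative decomposition, same cost.

-- ===== PORT A =====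
-- A's while-loop: walk forward, appending stripped lines, break after a line ending in "-/".
def pvALoop (lines : List String) (index : Int) (acc : List String) : List String × Int :=
  if _h : index < (lines.length : Int) then
    let line := PySem.Str.strip (PySem.List.pyGetD lines index "")
    if PySem.Str.endswith line "-/" then
      (acc ++ [PySem.Str.strip (PySem.Str.slice line none (some (-2)))], index + 1)
    else
      pvALoop lines (index + 1) (acc ++ [line])
  else (acc, index)
  termination_by ((lines.length : Int) - index).toNat
  decreasing_by omega

def parse_comment_block (lines : List String) (index : Int) : String × Int :=
  let line := PySem.Str.strip (PySem.List.pyGetD lines index "")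
  if PySem.Str.startswith line "/-" && PySem.Str.endswith line "-/" && decide (3 < PySem.Str.len line) then
    (PySem.Str.join "\n" [PySem.Str.strip (PySem.Str.slice line (some 2) (some (-2)))], index + 1)
  else
    let r := pvALoop lines (index + 1) [PySem.Str.strip (PySem.Str.slice line (some 2) none)]
    (PySem.Str.strip (PySem.Str.join "\n" r.1), r.2)

-- ===== PORT B =====
-- pass 1 of B: first k in ks whose stripped line ends with "-/" (Python's next(... , None))
def pvBFind (lines : List String) : List Int → Option Int
  | [] => none
  | k :: ks =>
      if PySem.Str.endswith (PySem.Str.strip (PySem.List.pyGetD lines k "")) "-/" then some k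
      else pvBFind lines ks

def parse_comment_block_alt (lines : List String) (index : Int) : String × Int :=
  let first := PySem.Str.strip (PySem.List.pyGetD lines index "")
  if PySem.Str.startswith first "/-" && PySem.Str.endswith first "-/" && decide (3 < PySem.Str.len first) then
    (PySem.Str.strip (PySem.Str.slice first (some 2) (some (-2))), index + 1)
  else
    let j? := pvBFind lines (PySem.List.pyRange (index + 1) (lines.length : Int) 1)
    let e : Int := match j? with | none => (lines.length : Int) | some j => j + 1
    -- pass 2 of B: the list comprehension over the located region
    let parts := PySem.Str.strip (PySem.Str.slice first (some 2) none) ::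
      (PySem.List.pyRange (index + 1) e 1).map (fun k =>
        if j? == some k then
          PySem.Str.strip (PySem.Str.slice (PySem.Str.strip (PySem.List.pyGetD lines k "")) none (some (-2)))
        else PySem.Str.strip (PySem.List.pyGetD lines k ""))
    (PySem.Str.strip (PySem.Str.join "\n" parts), e)

-- ===== PRECONDITION & SPEC =====
-- Pre_ excludes exactly the out-of-range indices, on which Python's lines[index] raises IndexError.
def Pre_parse_comment_block (lines : List String) (index : Int) : Prop :=
  PySem.Raise.InRange lines.length index
instance (lines : List String) (index : Int) : Decidable (Pre_parse_comment_block lines index) := by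
  unfold Pre_parse_comment_block; infer_instance

def pvWitness_parse_comment_block : List String × Int := (["/- a", "b", "c -/", "d"], 0)

def Spec_parse_comment_block (lines : List String) (index : Int) (out : String × Int) : Prop := out = parse_comment_block_alt lines index
instance (lines : List String) (index : Int) (out : String × Int) : Decidable (Spec_parse_comment_block lines index out) := by unfold Spec_parse_comment_block; infer_instance

-- ===== CLAIM (what is proved, stated in full; the proofs are below) =====
def Claim_equal_parse_comment_block : Prop := ∀ (lines : List String) (index : Int), Dom_parse_comment_block lines index → Pre_parse_comment_block lines index → Spec_parse_comment_block lines index (parse_comment_block lines index)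

-- ===== LEMMAS AND PROOFS =====

theorem pvBFind_mem {lines : List String} {ks : List Int} {j : Int}
    (h : pvBFind lines ks = some j) : j ∈ ks := by
  induction ks with
  | nil => simp [pvBFind] at h
  | cons k ks ih =>
      rw [pvBFind] at h
      split at h
      · simp_all
      · exact List.mem_cons_of_mem _ (ih h)

theorem pvRange_nil {a b : Int} (h : b ≤ a) : PySem.List.pyRange a b 1 = [] := by
  cases hx : PySem.List.pyRange a b 1 with
  | nil => rfl
  | cons y ys =>
      exfalso
      have hy : y ∈ PySem.List.pyRange a b 1 := by rw [hx]; exact List.mem_cons_self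
      rw [PySem.List.mem_pyRange_one] at hy
      omega

-- A's loop, started at i ≤ len, computes exactly B's find-then-map decomposition.
theorem pvLoopEq (lines : List String) (i : Int) (hle : i ≤ (lines.length : Int)) (acc : List String) :
    pvALoop lines i acc =
      match pvBFind lines (PySem.List.pyRange i (lines.length : Int) 1) with
      | none => (acc ++ (PySem.List.pyRange i (lines.length : Int) 1).map
            (fun k => PySem.Str.strip (PySem.List.pyGetD lines k "")), (lines.length : Int))
      | some j => (acc ++ (PySem.List.pyRange i (j + 1) 1).map
            (fun k => if (some j : Option Int) == some k then
                PySem.Str.strip (PySem.Str.slice (PySem.Str.strip (PySem.List.pyGetD lines k "")) none (some (-2)))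
              else PySem.Str.strip (PySem.List.pyGetD lines k "")), j + 1) := by
  by_cases h : i < (lines.length : Int)
  · rw [PySem.List.pyRange_one_cons h]
    rw [pvALoop]
    simp only [h, dif_pos]
    by_cases hend : PySem.Str.endswith (PySem.Str.strip (PySem.List.pyGetD lines i "")) "-/"
    · rw [pvBFind]
      simp only [hend, if_pos]
      rw [PySem.List.pyRange_one_cons (by omega : i < i + 1), pvRange_nil (by omega : i + 1 ≤ i + 1)]
      simp
    · rw [pvBFind]
      simp only [hend, if_neg, Bool.false_eq_true, not_false_iff]
      have ih := pvLoopEq lines (i + 1) (by omega) (acc ++ [PySem.Str.strip (PySem.List.pyGetD lines i "")])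
      rw [ih]
      cases hf : pvBFind lines (PySem.List.pyRange (i + 1) (lines.length : Int) 1) with
      | none => simp
      | some j =>
          have hj : j ∈ PySem.List.pyRange (i + 1) (lines.length : Int) 1 := pvBFind_mem hf
          rw [PySem.List.mem_pyRange_one] at hj
          simp only
          rw [PySem.List.pyRange_one_cons (by omega : i < j + 1)]
          have hji : ¬ (j = i) := by omega
          simp [hji]
  · have hi : i = (lines.length : Int) := le_antisymm hle (not_lt.mp h)
    rw [pvALoop]
    simp [pvBFind, hi, pvRange_nil (le_refl _)]
  termination_by ((lines.length : Int) - i).toNat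
  decreasing_by omega

-- ===== VERDICT (by name: the statement is the Claim_ definition above) =====
theorem parse_comment_block_spec : Claim_equal_parse_comment_block := by
  intro lines index _hdom hpre
  unfold Spec_parse_comment_block
  unfold parse_comment_block parse_comment_block_alt
  simp only
  by_cases hsingle : (PySem.Str.startswith (PySem.Str.strip (PySem.List.pyGetD lines index "")) "/-" &&
      PySem.Str.endswith (PySem.Str.strip (PySem.List.pyGetD lines index "")) "-/" &&
      decide (3 < PySem.Str.len (PySem.Str.strip (PySem.List.pyGetD lines index "")))) = true
  · rw [if_pos hsingle, if_pos hsingle]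
    simp [PySem.Str.join, PySem.Chars.join_singleton, PySem.Str.strip, PySem.Str.slice]
  · rw [if_neg hsingle, if_neg hsingle]
    have hle : index + 1 ≤ (lines.length : Int) := by
      unfold Pre_parse_comment_block PySem.Raise.InRange at hpre
      omega
    rw [pvLoopEq lines (index + 1) hle]
    cases hf : pvBFind lines (PySem.List.pyRange (index + 1) (lines.length : Int) 1) with
    | none => simp
    | some j => simp
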